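-- pv_equiv track=rewrite | github.com/RobGrimm/CogSci2017-MultiWordUnits | Tables/Table3-example_mwus.py | map_frequncies_to_mwus
-- ===== SOURCE A (Python) =====
-- def map_frequncies_to_mwus(mwu_freq_dict):
--     freqs_to_mwus = dict()
--     for mwu, freq in mwu_freq_dict.items():
--         if freq in freqs_to_mwus:
--             freqs_to_mwus[freq].append(mwu)
--         else:
--             freqs_to_mwus[freq] = [mwu]
--     return freqs_to_mwus
-- ===== SOURCE B (Python) =====
-- def map_frequncies_to_mwus(mwu_freq_dict):
--     # Stage 1: distinct frequencies in first-occurrence order; Stage 2: one group per frequency.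
--     return {f: [m for m, g in mwu_freq_dict.items() if g == f]
--             for f in dict.fromkeys(mwu_freq_dict.values())}
-- ===== Notes on version B (the rewrite author's own statement) =====
-- stated objective: alternative
-- what changed: Replaces A's single mutating hashed-accumulation pass (membership test, append-or-create on a dict) with two staged passes: first an ordered dedup of the frequency values (dict.fromkeys), then a comprehension that builds each group by filtering the items once per distinct frequency.
import Mathlib
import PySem

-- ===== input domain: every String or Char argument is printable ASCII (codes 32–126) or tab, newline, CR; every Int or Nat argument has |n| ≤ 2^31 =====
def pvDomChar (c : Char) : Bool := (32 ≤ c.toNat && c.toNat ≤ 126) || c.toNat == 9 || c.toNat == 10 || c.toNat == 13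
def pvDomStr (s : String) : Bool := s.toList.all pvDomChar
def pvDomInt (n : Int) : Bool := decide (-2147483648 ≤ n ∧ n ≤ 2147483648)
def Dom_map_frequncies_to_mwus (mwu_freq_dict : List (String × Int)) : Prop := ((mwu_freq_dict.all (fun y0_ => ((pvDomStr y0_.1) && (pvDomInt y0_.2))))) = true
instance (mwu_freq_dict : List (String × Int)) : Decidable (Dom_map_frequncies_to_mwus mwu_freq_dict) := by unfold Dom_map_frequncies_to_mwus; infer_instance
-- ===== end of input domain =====

-- B replaces A's mutating hashed-accumulation loop with two staged passes: an ordered dedup of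
-- the frequency values, then one filtering comprehension per distinct frequency; objective: alternative.


-- ===== PORT A =====
def map_frequncies_to_mwus (mwu_freq_dict : List (String × Int)) : List (Int × List String) :=
  (mwu_freq_dict.foldl (fun d p =>
      match d.get? p.2 with
      | some l => d.insert p.2 (l ++ [p.1])
      | none   => d.insert p.2 [p.1])
    (PySem.Dict.empty : PySem.Dict Int (List String))).items

-- ===== PORT B =====
-- dict.fromkeys(values) = ordered dedup (PySem.List.dedup); the keys of the comprehension are
-- therefore distinct, so its resulting dict is exactly this association list.
def map_frequncies_to_mwus_alt (mwu_freq_dict : List (String × Int)) : List (Int × List String) :=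
  (PySem.List.dedup (mwu_freq_dict.map (·.2))).map
    (fun f => (f, (mwu_freq_dict.filter (fun q => q.2 == f)).map Prod.fst))

-- ===== PRECONDITION & SPEC =====
def Spec_map_frequncies_to_mwus (mwu_freq_dict : List (String × Int)) (out : List (Int × List String)) : Prop := out = map_frequncies_to_mwus_alt mwu_freq_dict
instance (mwu_freq_dict : List (String × Int)) (out : List (Int × List String)) : Decidable (Spec_map_frequncies_to_mwus mwu_freq_dict out) := by unfold Spec_map_frequncies_to_mwus; infer_instance

-- ===== CLAIM (what is proved, stated in full; the proofs are below) =====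
def Claim_equal_map_frequncies_to_mwus : Prop := ∀ (mwu_freq_dict : List (String × Int)), Dom_map_frequncies_to_mwus mwu_freq_dict → Spec_map_frequncies_to_mwus mwu_freq_dict (map_frequncies_to_mwus mwu_freq_dict)

-- ===== LEMMAS AND PROOFS =====

-- A's append-or-create step is exactly Dict.modify with default [].
theorem stepA_eq_modify (d : PySem.Dict Int (List String)) (p : String × Int) :
    (match d.get? p.2 with
      | some l => d.insert p.2 (l ++ [p.1])
      | none   => d.insert p.2 [p.1]) = d.modify p.2 [] (· ++ [p.1]) := by
  simp [PySem.Dict.modify, PySem.Dict.getD_eq_get?_getD]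
  cases d.get? p.2 <;> rfl

-- A's dict, read out as items, is B's staged construction.
theorem map_frequncies_to_mwus_eq_alt (xs : List (String × Int)) :
    map_frequncies_to_mwus xs = map_frequncies_to_mwus_alt xs := by
  unfold map_frequncies_to_mwus map_frequncies_to_mwus_alt
  have hstep : (fun (d : PySem.Dict Int (List String)) (p : String × Int) =>
      match d.get? p.2 with
      | some l => d.insert p.2 (l ++ [p.1])
      | none   => d.insert p.2 [p.1]) = fun d p => d.modify p.2 [] (· ++ [p.1]) := by
    funext d p; exact stepA_eq_modify d p
  rw [hstep]
  set dA := xs.foldl (fun d p => d.modify p.2 [] (· ++ [p.1]))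
      (PySem.Dict.empty : PySem.Dict Int (List String)) with hdA
  have hswap : dA = (xs.map Prod.swap).foldl (fun d q => d.modify q.1 [] (· ++ [q.2]))
      (PySem.Dict.empty : PySem.Dict Int (List String)) := by
    rw [hdA, List.foldl_map]; rfl
  have hkeys : dA.keys = PySem.Set.ofList (xs.map (·.2)) := by
    rw [hdA, PySem.Dict.keys_foldl_modify_key]
    simp [PySem.Set.update_nil_left]
  have hnodup : dA.keys.Nodup := by
    rw [hkeys]; exact PySem.Set.nodup_ofList _
  have hget : ∀ f, dA.getD f [] = (xs.filter (fun q => q.2 == f)).map Prod.fst := by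
    intro f
    rw [hswap, PySem.Dict.getD_foldl_modify_append]
    simp [List.filter_map, Function.comp_def]
  rw [PySem.Dict.items_eq_map_keys dA hnodup [], hkeys, PySem.List.dedup_eq_ofList]
  exact List.map_congr_left (fun f _ => by rw [hget f])

-- ===== VERDICT (by name: the statement is the Claim_ definition above) =====
theorem map_frequncies_to_mwus_spec : Claim_equal_map_frequncies_to_mwus := by
  intro xs _
  unfold Spec_map_frequncies_to_mwus
  exact map_frequncies_to_mwus_eq_alt xs
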